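-- pv_equiv track=rewrite | github.com/CdkeyTJ/NLP_Partition_work | build_model.py | encode_data
-- ===== SOURCE A (Python) =====
-- def is_valid_split_point(label_seq, i):
--     """
--     判断是否可以在标签序列的第 i 个位置切分。
--     合法切分点包括：S/S, E/B, E/S, S/B。
--     """
--     if i == 0 or i >= len(label_seq):  # 句子开头或结尾不允许切分
--         return False
--     prev_label = label_seq[i - 1]
--     curr_label = label_seq[i]
--     valid_splits = [('S', 'S'), ('E', 'B'), ('E', 'S'), ('S', 'B')]
--     return (prev_label, curr_label) in valid_splits
--
-- def split_sentence(sentence, labels, max_len):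
--     """
--     根据标签序列和最大长度切分句子，确保不破坏词语完整性。
--     """
--     sub_sentences, sub_labels = [], []
--
--     start = 0
--     while start < len(sentence):
--         end = min(start + max_len, len(sentence))  # 默认切分点
--
--         # 如果当前窗口超出了最大长度，寻找最近的合法切分点
--         if end < len(sentence) and not is_valid_split_point(labels, end):
--             for j in range(end, start, -1):
--                 if is_valid_split_point(labels, j):
--                     end = j
--                     break
--
--         # 提取当前窗口的子句和标签
--         sub_sentence = sentence[start:end]
--         sub_label = labels[start:end]
--
--         # 添加到结果列表
--         sub_sentences.append(sub_sentence)
--         sub_labels.append(sub_label)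
--
--         # 更新起点
--         start = end
--
--     return sub_sentences, sub_labels
--
-- def encode_data(sentences, labels, vocab, label_map, max_len=100):
--     """
--     使用合法切分点将句子和标签编码为数字，并保留上下文信息。
--     """
--     encoded_sentences, encoded_labels = [], []
--
--     # 遍历每个句子和对应的标签序列
--     for sentence, label_seq in zip(sentences, labels):
--         # 按合法切分点分割句子和标签
--         sub_sentences, sub_labels = split_sentence(sentence, label_seq, max_len)
--
--         # 对每个子句进行编码
--         for sub_sentence, sub_label in zip(sub_sentences, sub_labels):
--             # 填充至最大长度
--             sub_sentence = sub_sentence + ['<PAD>'] * (max_len - len(sub_sentence))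
--             sub_label = sub_label + [-1] * (max_len - len(sub_label))
--
--             # 编码为整数
--             encoded_sentences.append([vocab.get(char, 0) for char in sub_sentence])
--             encoded_labels.append([label_map.get(label, -1) for label in sub_label])
--
--     return encoded_sentences, encoded_labels
-- ===== SOURCE B (Python) =====
-- def encode_data(sentences, labels, vocab, label_map, max_len=100):
--     """Encode like A, but snap window ends via a precomputed 'last valid split
--     point <= i' table instead of a per-window backward scan, and encode/pad rows
--     directly instead of materialising padded sub-sentence lists first."""
--     pairs = {('S', 'S'), ('E', 'B'), ('E', 'S'), ('S', 'B')}
--     encoded_sentences, encoded_labels = [], []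
--     for sentence, lab in zip(sentences, labels):
--         n = len(sentence)
--         m = len(lab)
--         # prev[i] = largest valid split index <= i (0 when there is none;
--         # 0 is never a valid split point).
--         prev = [0]
--         for i in range(1, n + 1):
--             if i < m and (lab[i - 1], lab[i]) in pairs:
--                 prev.append(i)
--             else:
--                 prev.append(prev[-1])
--         pad_id = vocab.get('<PAD>', 0)
--         start = 0
--         while start < n:
--             end = min(start + max_len, n)
--             if end < n:
--                 j = prev[end]
--                 if j > start:
--                     end = j
--             row = [vocab.get(ch, 0) for ch in sentence[start:end]]
--             lrow = [label_map.get(l, -1) for l in lab[start:end]]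
--             row += [pad_id] * (max_len - len(row))
--             lrow += [-1] * (max_len - len(lrow))
--             encoded_sentences.append(row)
--             encoded_labels.append(lrow)
--             start = end
--     return encoded_sentences, encoded_labels
-- ===== Notes on version B (the rewrite author's own statement) =====
-- stated objective: faster
-- what changed: split_sentence's per-window backward scan for a valid split point is replaced by a 'last valid split point <= i' table precomputed in one forward pass, and rows are encoded/padded directly (pad id looked up once) instead of building padded string lists and encoding them in a second loop.
import Mathlib
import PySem

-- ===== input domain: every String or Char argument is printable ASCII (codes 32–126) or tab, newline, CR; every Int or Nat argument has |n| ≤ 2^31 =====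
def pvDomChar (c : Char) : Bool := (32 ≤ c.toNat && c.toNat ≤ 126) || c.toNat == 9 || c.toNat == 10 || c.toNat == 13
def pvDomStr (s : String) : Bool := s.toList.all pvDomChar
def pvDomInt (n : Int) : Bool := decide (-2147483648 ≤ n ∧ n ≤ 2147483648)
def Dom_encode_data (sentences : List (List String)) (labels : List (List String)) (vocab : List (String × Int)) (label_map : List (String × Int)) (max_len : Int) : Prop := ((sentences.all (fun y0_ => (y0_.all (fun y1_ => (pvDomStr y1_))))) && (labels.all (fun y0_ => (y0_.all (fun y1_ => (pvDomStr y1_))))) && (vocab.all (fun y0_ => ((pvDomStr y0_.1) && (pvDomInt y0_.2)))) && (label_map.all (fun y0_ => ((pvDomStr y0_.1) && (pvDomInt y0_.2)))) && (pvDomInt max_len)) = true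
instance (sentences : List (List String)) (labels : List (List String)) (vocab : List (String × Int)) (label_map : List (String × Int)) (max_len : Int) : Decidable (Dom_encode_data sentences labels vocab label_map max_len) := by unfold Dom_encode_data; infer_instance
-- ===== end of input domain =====

-- B replaces A's per-window backward scan with a 'last valid split point ≤ i' table built in
-- one forward pass, and encodes/pads rows directly instead of building padded string lists first.

-- ===== PORT A =====

-- dict.get(k, dflt) on a dict parameter (association list, first match)
def pvGetDict (d : List (String × Int)) (k : String) (dflt : Int) : Int :=
  match d.find? (fun p => p.1 == k) with
  | some p => p.2
  | none => dflt

def pvValidSplits : List (String × String) := [("S","S"),("E","B"),("E","S"),("S","B")]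

def is_valid_split_point (label_seq : List String) (i : Int) : Bool :=
  if i = 0 ∨ (label_seq.length : Int) ≤ i then false
  else
    -- the guard ensures 0 ≤ i-1 and i < len, so both pyGet? are `some` (Python never raises here)
    match PySem.List.pyGet? label_seq (i-1), PySem.List.pyGet? label_seq i with
    | some prev_label, some curr_label => pvValidSplits.contains (prev_label, curr_label)
    | _, _ => false

-- the while loop of split_sentence; fuel = len(sentence) suffices whenever the Python loop
-- terminates (under Pre_ below, start strictly increases each iteration)
def splitA_go (sentence labels : List String) (max_len : Int) (start : Int) : Nat → List (List String) × List (List String)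
  | 0 => ([], [])
  | fuel + 1 =>
    if start < (sentence.length : Int) then
      let e0 : Int := min (start + max_len) (sentence.length : Int)
      let e1 : Int :=
        if e0 < (sentence.length : Int) ∧ is_valid_split_point labels e0 = false then
          match (PySem.List.pyRange e0 start (-1)).find? (fun j => is_valid_split_point labels j) with
          | some j => j
          | none => e0
        else e0
      let rest := splitA_go sentence labels max_len e1 fuel
      (PySem.List.slice sentence (some start) (some e1) :: rest.1,
       PySem.List.slice labels (some start) (some e1) :: rest.2)
    else ([], [])

def split_sentence (sentence labels : List String) (max_len : Int) : List (List String) × List (List String) :=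
  splitA_go sentence labels max_len 0 sentence.length

-- body of A's inner 'for sub_sentence, sub_label in zip(...)' loop
def pvEncRow (vocab label_map : List (String × Int)) (max_len : Int) (acc2 : List (List Int) × List (List Int)) (p : List String × List String) : List (List Int) × List (List Int) :=
  -- sub_sentence = sub_sentence + ['<PAD>'] * (max_len - len(sub_sentence))
  let padded_s := p.1 ++ List.replicate (max_len - (p.1.length : Int)).toNat "<PAD>"
  -- Python pads sub_label with the INT -1 (a mixed str/int list); label_map's keys are
  -- strings (type convention), so label_map.get(-1, -1) = -1: ported as encode-then-pad.
  (acc2.1 ++ [padded_s.map (fun ch => pvGetDict vocab ch 0)],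
   acc2.2 ++ [p.2.map (fun l => pvGetDict label_map l (-1)) ++ List.replicate (max_len - (p.2.length : Int)).toNat (-1)])

def encode_data (sentences : List (List String)) (labels : List (List String)) (vocab : List (String × Int)) (label_map : List (String × Int)) (max_len : Int) : List (List Int) × List (List Int) :=
  (sentences.zip labels).foldl (fun acc sl =>
    let subs := split_sentence sl.1 sl.2 max_len
    (subs.1.zip subs.2).foldl (pvEncRow vocab label_map max_len) acc) ([], [])

-- ===== PORT B =====

def pvPairSet : PySem.Set (String × String) := PySem.Set.ofList [("S","S"),("E","B"),("E","S"),("S","B")]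

-- prev[i] = largest valid split index ≤ i (0 when there is none); one forward pass
def pvPrevTable (lab : List String) (n : Nat) : List Int :=
  (PySem.List.pyRange 1 ((n : Int) + 1) 1).foldl (fun prev i =>
    -- 1 ≤ i from the range and i < m from the test, so lab[i-1]/lab[i] never raise
    if i < (lab.length : Int) ∧ pvPairSet.contains (PySem.List.pyGetD lab (i-1) "", PySem.List.pyGetD lab i "") = true then
      prev ++ [i]
    else prev ++ [PySem.List.pyGetD prev (-1) 0]) [0]

-- B's while loop: appends the encoded, padded rows of one sentence onto the accumulator
def splitB_go (sentence lab : List String) (vocab label_map : List (String × Int)) (max_len : Int) (prev : List Int) (pad_id : Int) (start : Int) : Nat → List (List Int) × List (List Int) → List (List Int) × List (List Int)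
  | 0, acc => acc
  | fuel + 1, acc =>
    if start < (sentence.length : Int) then
      let e0 : Int := min (start + max_len) (sentence.length : Int)
      let e1 : Int :=
        if e0 < (sentence.length : Int) then
          let j := PySem.List.pyGetD prev e0 0   -- 0 ≤ e0 ≤ n < len(prev): in range
          if start < j then j else e0
        else e0
      let row := (PySem.List.slice sentence (some start) (some e1)).map (fun ch => pvGetDict vocab ch 0)
      let lrow := (PySem.List.slice lab (some start) (some e1)).map (fun l => pvGetDict label_map l (-1))
      let row' := row ++ List.replicate (max_len - (row.length : Int)).toNat pad_id
      let lrow' := lrow ++ List.replicate (max_len - (lrow.length : Int)).toNat (-1)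
      splitB_go sentence lab vocab label_map max_len prev pad_id e1 fuel (acc.1 ++ [row'], acc.2 ++ [lrow'])
    else acc

def encode_data_alt (sentences : List (List String)) (labels : List (List String)) (vocab : List (String × Int)) (label_map : List (String × Int)) (max_len : Int) : List (List Int) × List (List Int) :=
  (sentences.zip labels).foldl (fun acc sl =>
    splitB_go sl.1 sl.2 vocab label_map max_len (pvPrevTable sl.2 sl.1.length) (pvGetDict vocab "<PAD>" 0) 0 sl.1.length acc) ([], [])

-- ===== PRECONDITION & SPEC =====
-- Pre_ excludes only inputs on which A never returns: with max_len ≤ 0 the while loop of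
-- split_sentence makes no progress (end ≤ start) and A diverges — unless every zipped
-- sentence is empty, so the loop body is never entered; those inputs stay inside Pre_.
def Pre_encode_data (sentences : List (List String)) (labels : List (List String)) (vocab : List (String × Int)) (label_map : List (String × Int)) (max_len : Int) : Prop :=
  1 ≤ max_len ∨ ∀ p ∈ sentences.zip labels, p.1 = []
instance (sentences : List (List String)) (labels : List (List String)) (vocab : List (String × Int)) (label_map : List (String × Int)) (max_len : Int) : Decidable (Pre_encode_data sentences labels vocab label_map max_len) := by unfold Pre_encode_data; infer_instance

def pvWitness_encode_data : List (List String) × List (List String) × (List (String × Int)) × (List (String × Int)) × Int :=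
  ([["a","b","c"]], [["S","S","E"]], [("a",1),("<PAD>",9)], [("S",2),("E",3)], 2)

def Spec_encode_data (sentences : List (List String)) (labels : List (List String)) (vocab : List (String × Int)) (label_map : List (String × Int)) (max_len : Int) (out : List (List Int) × List (List Int)) : Prop := out = encode_data_alt sentences labels vocab label_map max_len
instance (sentences : List (List String)) (labels : List (List String)) (vocab : List (String × Int)) (label_map : List (String × Int)) (max_len : Int) (out : List (List Int) × List (List Int)) : Decidable (Spec_encode_data sentences labels vocab label_map max_len out) := by unfold Spec_encode_data; infer_instance

-- ===== CLAIM (what is proved, stated in full; the proofs are below) =====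
def Claim_equal_encode_data : Prop := ∀ (sentences : List (List String)) (labels : List (List String)) (vocab : List (String × Int)) (label_map : List (String × Int)) (max_len : Int), Dom_encode_data sentences labels vocab label_map max_len → Pre_encode_data sentences labels vocab label_map max_len → Spec_encode_data sentences labels vocab label_map max_len (encode_data sentences labels vocab label_map max_len)

-- ===== LEMMAS AND PROOFS =====

-- reference function: pvPf lab i = largest valid split point ≤ i (0 when there is none)
def pvPf (lab : List String) : Nat → Int
  | 0 => 0
  | i + 1 => if is_valid_split_point lab ((i : Int) + 1) then (i : Int) + 1 else pvPf lab i

theorem pvPf_le (lab : List String) (i : Nat) : pvPf lab i ≤ (i : Int) := by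
  induction i with
  | zero => simp [pvPf]
  | succ k ih =>
    simp only [pvPf]
    split_ifs
    · push_cast; omega
    · refine ih.trans ?_; push_cast; omega

theorem pvPf_of_valid (lab : List String) (i : Nat) (hv : is_valid_split_point lab (i : Int) = true) :
    pvPf lab i = (i : Int) := by
  cases i with
  | zero => simp [is_valid_split_point] at hv
  | succ k =>
    have hv' : is_valid_split_point lab ((k : Int) + 1) = true := by push_cast at hv; exact hv
    simp only [pvPf, if_pos hv']
    push_cast
    ring

theorem pvValid_iff (lab : List String) (i : Int) (h : 1 ≤ i) :
    (i < (lab.length : Int) ∧ pvPairSet.contains (PySem.List.pyGetD lab (i-1) "", PySem.List.pyGetD lab i "") = true) ↔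
      is_valid_split_point lab i = true := by
  have hset : pvPairSet = pvValidSplits := by decide
  unfold is_valid_split_point
  by_cases him : i < (lab.length : Int)
  · rw [if_neg (by omega)]
    rw [PySem.List.pyGet?_eq_some_getElem lab (i := i-1) (by omega) (by omega),
        PySem.List.pyGet?_eq_some_getElem lab (i := i) (by omega) (by omega)]
    simp only [hset, PySem.List.pyGetD_eq_getElem lab "" (i := i-1) (by omega) (by omega),
      PySem.List.pyGetD_eq_getElem lab "" (i := i) (by omega) (by omega),
      PySem.Set.contains_eq_listContains]
    exact ⟨fun ⟨_, hx⟩ => hx, fun hx => ⟨him, hx⟩⟩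
  · rw [if_pos (by omega)]
    simp [him]

theorem pvPrevTable_eq (lab : List String) (n : Nat) :
    pvPrevTable lab n = (List.range (n+1)).map (pvPf lab) := by
  induction n with
  | zero =>
    simp [pvPrevTable, PySem.List.pyRange_one_eq_nil (le_refl (1 : Int)), pvPf]
  | succ n ih =>
    unfold pvPrevTable
    have hb : ((n + 1 : Nat) : Int) + 1 = ((n : Int) + 1) + 1 := by push_cast; ring
    rw [hb, PySem.List.pyRange_one_succ_right (by omega), List.foldl_append]
    have hprev : (PySem.List.pyRange 1 ((n : Int) + 1) 1).foldl (fun prev i =>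
        if i < (lab.length : Int) ∧ pvPairSet.contains (PySem.List.pyGetD lab (i-1) "", PySem.List.pyGetD lab i "") = true then
          prev ++ [i]
        else prev ++ [PySem.List.pyGetD prev (-1) 0]) [0] = pvPrevTable lab n := rfl
    rw [hprev, ih, List.foldl_cons, List.foldl_nil]
    rw [List.range_succ (n := n + 1), List.map_append]
    by_cases hv : is_valid_split_point lab ((n : Int) + 1) = true
    · rw [if_pos ((pvValid_iff lab ((n : Int) + 1) (by omega)).mpr hv)]
      simp [pvPf, hv]
    · rw [if_neg (fun hc => hv ((pvValid_iff lab ((n : Int) + 1) (by omega)).mp hc))]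
      congr 1
      · simp only [List.range_succ, List.map_append, List.map_cons, List.map_nil,
          PySem.List.pyGetD_neg_one_append_singleton]
        simp [pvPf, hv]

theorem pvPrevTable_getD (lab : List String) (n : Nat) (e : Int) (h0 : 0 ≤ e) (h1 : e ≤ (n : Int)) :
    PySem.List.pyGetD (pvPrevTable lab n) e 0 = pvPf lab e.toNat := by
  rw [pvPrevTable_eq, show e = ((e.toNat : Nat) : Int) from (Int.toNat_of_nonneg h0).symm,
    PySem.List.pyGetD_natCast, List.getD_eq_getElem?_getD]
  simp [show e.toNat < n + 1 by omega]
  congr 1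
  omega

theorem pvScan_eq (lab : List String) (start : Int) (e : Nat) (h0 : 0 ≤ start) (h : start < (e : Int)) :
    (PySem.List.pyRange (e : Int) start (-1)).find? (fun j => is_valid_split_point lab j)
      = if start < pvPf lab e then some (pvPf lab e) else none := by
  induction e with
  | zero => omega
  | succ k ih =>
    have hcast : ((k + 1 : Nat) : Int) = (k : Int) + 1 := by push_cast; ring
    rw [hcast] at h ⊢
    rw [PySem.List.pyRange_neg_one_cons h, show (k : Int) + 1 - 1 = (k : Int) by ring]
    by_cases hv : is_valid_split_point lab ((k : Int) + 1) = true
    · rw [List.find?_cons_of_pos (p := fun j => is_valid_split_point lab j) (by simpa using hv)]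
      have : pvPf lab (k + 1) = (k : Int) + 1 := by simp [pvPf, hv]
      rw [this, if_pos (by omega)]
    · rw [List.find?_cons_of_neg (p := fun j => is_valid_split_point lab j) (by simpa using hv)]
      have hpf : pvPf lab (k + 1) = pvPf lab k := by simp [pvPf, hv]
      rw [hpf]
      by_cases hse : start < (k : Int)
      · exact ih hse
      · rw [PySem.List.pyRange_neg_one_eq_nil (by omega), List.find?_nil,
          if_neg (by have := pvPf_le lab k; omega)]

theorem pvEnd_eq (lab : List String) (n : Nat) (start e0 : Int)
    (h0 : 0 ≤ start) (hlt : start < e0) (hub : e0 ≤ (n : Int)) :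
    (if e0 < (n : Int) ∧ is_valid_split_point lab e0 = false then
        match (PySem.List.pyRange e0 start (-1)).find? (fun j => is_valid_split_point lab j) with
        | some j => j
        | none => e0
      else e0)
    = (if e0 < (n : Int) then
        (if start < PySem.List.pyGetD (pvPrevTable lab n) e0 0 then PySem.List.pyGetD (pvPrevTable lab n) e0 0 else e0)
      else e0) := by
  by_cases he : e0 < (n : Int)
  · have hte : ((e0.toNat : Nat) : Int) = e0 := Int.toNat_of_nonneg (by omega)
    rw [pvPrevTable_getD lab n e0 (by omega) hub]
    by_cases hv : is_valid_split_point lab e0 = true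
    · rw [if_neg (by simp [hv])]
      have hpf : pvPf lab e0.toNat = e0 := by
        rw [pvPf_of_valid lab e0.toNat (by rw [hte]; exact hv), hte]
      rw [if_pos he, hpf, if_pos hlt]
    · have hvf : is_valid_split_point lab e0 = false := by simpa using hv
      rw [if_pos ⟨he, hvf⟩, if_pos he]
      have hscan := pvScan_eq lab start e0.toNat h0 (by omega)
      rw [hte] at hscan
      rw [hscan]
      by_cases hj : start < pvPf lab e0.toNat
      · rw [if_pos hj, if_pos hj]
      · rw [if_neg hj, if_neg hj]
  · rw [if_neg (fun hc => he hc.1), if_neg he]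

theorem pvLoop_eq (sentence lab : List String) (vocab label_map : List (String × Int)) (max_len : Int)
    (hm : 1 ≤ max_len) :
    ∀ (fuel : Nat) (start : Int) (acc : List (List Int) × List (List Int)), 0 ≤ start →
      ((splitA_go sentence lab max_len start fuel).1.zip (splitA_go sentence lab max_len start fuel).2).foldl
          (pvEncRow vocab label_map max_len) acc
        = splitB_go sentence lab vocab label_map max_len (pvPrevTable lab sentence.length)
            (pvGetDict vocab "<PAD>" 0) start fuel acc := by
  intro fuel
  induction fuel with
  | zero => intro start acc _; rfl
  | succ fuel ih =>
    intro start acc h0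
    by_cases hs : start < (sentence.length : Int)
    · simp only [splitA_go, splitB_go, if_pos hs]
      rw [pvEnd_eq lab sentence.length start (min (start + max_len) (sentence.length : Int)) h0
        (by omega) (by omega)]
      simp only [List.zip_cons_cons, List.foldl_cons]
      rw [ih _ _ (by split_ifs <;> omega)]
      congr 1
      simp [pvEncRow, List.map_append, List.map_replicate]
    · simp [splitA_go, splitB_go, hs]

theorem pvSentence_eq (sentence lab : List String) (vocab label_map : List (String × Int)) (max_len : Int)
    (hpre : 1 ≤ max_len ∨ sentence = []) (acc : List (List Int) × List (List Int)) :
    ((split_sentence sentence lab max_len).1.zip (split_sentence sentence lab max_len).2).foldl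
        (pvEncRow vocab label_map max_len) acc
      = splitB_go sentence lab vocab label_map max_len (pvPrevTable lab sentence.length)
          (pvGetDict vocab "<PAD>" 0) 0 sentence.length acc := by
  rcases hpre with hm | hempty
  · exact pvLoop_eq sentence lab vocab label_map max_len hm sentence.length 0 acc le_rfl
  · subst hempty; rfl

theorem pvOuter_eq (vocab label_map : List (String × Int)) (max_len : Int) :
    ∀ (zl : List (List String × List String)) (acc : List (List Int) × List (List Int)),
      (∀ p ∈ zl, 1 ≤ max_len ∨ p.1 = []) →
      zl.foldl (fun acc sl =>
          let subs := split_sentence sl.1 sl.2 max_len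
          (subs.1.zip subs.2).foldl (pvEncRow vocab label_map max_len) acc) acc
        = zl.foldl (fun acc sl =>
            splitB_go sl.1 sl.2 vocab label_map max_len (pvPrevTable sl.2 sl.1.length)
              (pvGetDict vocab "<PAD>" 0) 0 sl.1.length acc) acc := by
  intro zl
  induction zl with
  | nil => intro acc _; rfl
  | cons hd tl ih =>
    intro acc hall
    simp only [List.foldl_cons]
    rw [pvSentence_eq hd.1 hd.2 vocab label_map max_len (hall hd (List.mem_cons_self)) acc]
    exact ih _ (fun p hp => hall p (List.mem_cons_of_mem _ hp))

-- ===== VERDICT (by name: the statement is the Claim_ definition above) =====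
theorem encode_data_spec : Claim_equal_encode_data := by
  intro sentences labels vocab label_map max_len _ hpre
  unfold Spec_encode_data encode_data encode_data_alt
  refine pvOuter_eq vocab label_map max_len (sentences.zip labels) ([], []) ?_
  rcases hpre with hm | hall
  · exact fun p _ => Or.inl hm
  · exact fun p hp => Or.inr (hall p hp)
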